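-- pv_equiv track=rewrite | github.com/rymlak/TP_python | utils.py | calcul_nb_voisins
-- ===== SOURCE A (Python) =====
-- def calcul_nb_voisins(Z):
--     forme = len(Z), len(Z[0])
--     N = [[0, ] * (forme[0]) for i in range(forme[1])]
--     for x in range(1, forme[0] - 1):
--         for y in range(1, forme[1] - 1):
--             N[x][y] = Z[x-1][y-1]+Z[x][y-1]+Z[x+1][y-1] \
--                    + Z[x-1][y] + 0 +Z[x+1][y] \
--                    + Z[x-1][y+1]+Z[x][y+1]+Z[x+1][y+1]
--     return N
-- ===== SOURCE B (Python) =====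
-- def calcul_nb_voisins(Z):
--     rows, cols = len(Z), len(Z[0])
--     N = [[0] * rows for _ in range(cols)]
--     # per-row prefix sums: P[i][j] = sum of Z[i][:j]
--     P = []
--     for row in Z:
--         s = 0
--         acc = [0]
--         for v in row:
--             s += v
--             acc.append(s)
--         P.append(acc)
--     for x in range(1, rows - 1):
--         for y in range(1, cols - 1):
--             N[x][y] = (P[x - 1][y + 2] - P[x - 1][y - 1]) \
--                     + (P[x][y + 2] - P[x][y - 1]) \
--                     + (P[x + 1][y + 2] - P[x + 1][y - 1]) \
--                     - Z[x][y]
--     return N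
-- ===== Notes on version B (the rewrite author's own statement) =====
-- stated objective: alternative
-- what changed: B precomputes per-row prefix sums once and obtains each cell's 8-neighbour total by inclusion-exclusion over three row bands (three prefix differences minus the centre) instead of summing the eight neighbours individually.
import Mathlib
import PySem

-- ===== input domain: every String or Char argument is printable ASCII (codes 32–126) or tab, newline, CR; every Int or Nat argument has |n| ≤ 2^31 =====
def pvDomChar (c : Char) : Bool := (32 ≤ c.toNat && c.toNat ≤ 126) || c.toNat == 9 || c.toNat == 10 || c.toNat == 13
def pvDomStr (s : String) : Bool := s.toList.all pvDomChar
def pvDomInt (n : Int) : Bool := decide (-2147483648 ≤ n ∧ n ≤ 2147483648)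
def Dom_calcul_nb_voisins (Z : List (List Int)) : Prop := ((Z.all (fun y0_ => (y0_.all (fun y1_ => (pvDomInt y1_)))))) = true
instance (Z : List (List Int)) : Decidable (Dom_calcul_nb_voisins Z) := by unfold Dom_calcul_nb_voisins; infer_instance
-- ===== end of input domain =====

-- B replaces the eight individual neighbour reads per cell by per-row prefix sums
-- and three band differences (inclusion-exclusion); alternative decomposition, same cost.

-- ===== PORT A =====
-- Z[i][j] for in-range nonnegative indices (total form; Pre_ keeps the loops in range)
def pvGet2 (Z : List (List Int)) (i j : Int) : Int :=
  PySem.List.pyGetD (PySem.List.pyGetD Z i []) j 0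

def calcul_nb_voisins (Z : List (List Int)) : List (List Int) :=
  let rows : Int := Z.length
  let cols : Int := (PySem.List.pyGetD Z 0 []).length
  let N : List (List Int) :=
    (PySem.List.pyRange 0 cols 1).map (fun _ => List.replicate rows.toNat (0 : Int))
  (PySem.List.pyRange 1 (rows - 1) 1).foldl (fun N x =>
    (PySem.List.pyRange 1 (cols - 1) 1).foldl (fun N y =>
      PySem.List.pySetD N x (PySem.List.pySetD (PySem.List.pyGetD N x []) y
        (pvGet2 Z (x-1) (y-1) + pvGet2 Z x (y-1) + pvGet2 Z (x+1) (y-1)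
          + pvGet2 Z (x-1) y + 0 + pvGet2 Z (x+1) y
          + pvGet2 Z (x-1) (y+1) + pvGet2 Z x (y+1) + pvGet2 Z (x+1) (y+1)))) N) N

-- ===== PORT B =====
-- prefix sums of one row: [0, r0, r0+r1, …]
def pvPrefix (row : List Int) : List Int :=
  (row.foldl (fun (acc : List Int × Int) v => (acc.1 ++ [acc.2 + v], acc.2 + v)) ([0], 0)).1

-- P[i][y+2] - P[i][y-1]
def pvBand (P : List (List Int)) (i y : Int) : Int :=
  PySem.List.pyGetD (PySem.List.pyGetD P i []) (y + 2) 0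
    - PySem.List.pyGetD (PySem.List.pyGetD P i []) (y - 1) 0

def calcul_nb_voisins_alt (Z : List (List Int)) : List (List Int) :=
  let rows : Int := Z.length
  let cols : Int := (PySem.List.pyGetD Z 0 []).length
  let N : List (List Int) :=
    (PySem.List.pyRange 0 cols 1).map (fun _ => List.replicate rows.toNat (0 : Int))
  let P : List (List Int) := Z.map pvPrefix
  (PySem.List.pyRange 1 (rows - 1) 1).foldl (fun N x =>
    (PySem.List.pyRange 1 (cols - 1) 1).foldl (fun N y =>
      PySem.List.pySetD N x (PySem.List.pySetD (PySem.List.pyGetD N x []) y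
        (pvBand P (x-1) y + pvBand P x y + pvBand P (x+1) y - pvGet2 Z x y))) N) N

-- ===== PRECONDITION & SPEC =====
-- Pre_ is exactly where the Python A returns: outside it A raises IndexError
-- (empty Z, or a 3×3-interior loop that reads a short row, or writes into the
-- transposed N of a grid whose width and height differ by more than 1).
def Pre_calcul_nb_voisins (Z : List (List Int)) : Prop :=
  Z ≠ [] ∧
  (Z.length < 3 ∨ (PySem.List.pyGetD Z 0 []).length < 3 ∨
    (Z.length ≤ (PySem.List.pyGetD Z 0 []).length + 1 ∧
     (PySem.List.pyGetD Z 0 []).length ≤ Z.length + 1 ∧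
     ∀ r ∈ Z, (PySem.List.pyGetD Z 0 []).length ≤ r.length))
instance (Z : List (List Int)) : Decidable (Pre_calcul_nb_voisins Z) := by
  unfold Pre_calcul_nb_voisins; infer_instance

def pvWitness_calcul_nb_voisins : List (List Int) := [[1,2,3],[4,5,6],[7,8,9]]

def Spec_calcul_nb_voisins (Z : List (List Int)) (out : List (List Int)) : Prop := out = calcul_nb_voisins_alt Z
instance (Z : List (List Int)) (out : List (List Int)) : Decidable (Spec_calcul_nb_voisins Z out) := by unfold Spec_calcul_nb_voisins; infer_instance

-- ===== CLAIM (what is proved, stated in full; the proofs are below) =====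
def Claim_equal_calcul_nb_voisins : Prop := ∀ (Z : List (List Int)), Dom_calcul_nb_voisins Z → Pre_calcul_nb_voisins Z → Spec_calcul_nb_voisins Z (calcul_nb_voisins Z)

-- ===== LEMMAS AND PROOFS =====

lemma pvPrefix_aux (r : List Int) (acc : List Int) (s : Int) :
    (r.foldl (fun (a : List Int × Int) v => (a.1 ++ [a.2 + v], a.2 + v)) (acc, s)).1
      = acc ++ (List.range r.length).map (fun j => s + (r.take (j+1)).sum) := by
  induction r generalizing acc s with
  | nil => simp
  | cons v t ih =>
      simp only [List.foldl_cons, ih, List.length_cons, List.range_succ_eq_map,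
        List.map_cons, List.map_map]
      simp [Function.comp, add_assoc]

lemma pvPrefix_eq (r : List Int) :
    pvPrefix r = (List.range (r.length + 1)).map (fun j => (r.take j).sum) := by
  unfold pvPrefix
  rw [pvPrefix_aux]
  simp [List.range_succ_eq_map, Function.comp]

lemma pvPrefix_get (r : List Int) (j : Nat) (h : j ≤ r.length) :
    PySem.List.pyGetD (pvPrefix r) ((j : Nat) : Int) 0 = (r.take j).sum := by
  rw [PySem.List.pyGetD_eq_getElem _ 0 (by omega)
      (by simp [pvPrefix_eq]; omega)]
  simp [pvPrefix_eq]

lemma pvBand_prefix (r : List Int) (y : Int) (k : Nat)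
    (hk : (k : Int) = y - 1) (hlen : k + 2 < r.length) :
    PySem.List.pyGetD (pvPrefix r) (y + 2) 0 - PySem.List.pyGetD (pvPrefix r) (y - 1) 0
      = PySem.List.pyGetD r (y - 1) 0 + PySem.List.pyGetD r y 0 + PySem.List.pyGetD r (y + 1) 0 := by
  have e2 : y + 2 = ((k + 3 : Nat) : Int) := by push_cast; omega
  have e0 : y - 1 = ((k : Nat) : Int) := by omega
  have eY : y = ((k + 1 : Nat) : Int) := by push_cast; omega
  have e1 : y + 1 = ((k + 2 : Nat) : Int) := by push_cast; omega
  rw [e2, e0, e1, eY,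
    pvPrefix_get r (k+3) (by omega), pvPrefix_get r k (by omega),
    PySem.List.pyGetD_eq_getElem r 0 (by omega) (by exact_mod_cast (by omega : k < r.length)),
    PySem.List.pyGetD_eq_getElem r 0 (by omega) (by exact_mod_cast (by omega : k + 1 < r.length)),
    PySem.List.pyGetD_eq_getElem r 0 (by omega) (by exact_mod_cast (by omega : k + 2 < r.length))]
  have h3 : r.take (k+3) = r.take k ++ [r[k], r[k+1], r[k+2]] := by
    have d0 : r.drop k = r[k] :: r.drop (k+1) := (List.getElem_cons_drop (by omega)).symm
    have d1 : r.drop (k+1) = r[k+1] :: r.drop (k+2) := (List.getElem_cons_drop (by omega)).symm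
    have d2 : r.drop (k+2) = r[k+2] :: r.drop (k+3) := (List.getElem_cons_drop (by omega)).symm
    rw [List.take_add, d0, d1, d2]
    rfl
  rw [h3]
  simp only [List.sum_append, List.sum_cons, List.sum_nil, Int.toNat_natCast]
  ring

lemma pyGetD_map_pvPrefix (Z : List (List Int)) (i : Int)
    (h0 : 0 ≤ i) (h1 : i < (Z.length : Int)) :
    PySem.List.pyGetD (Z.map pvPrefix) i [] = pvPrefix (PySem.List.pyGetD Z i []) := by
  rw [PySem.List.pyGetD_eq_getElem _ [] h0 (by simpa using h1),
      PySem.List.pyGetD_eq_getElem _ [] h0 h1]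
  simp

lemma row_mem (Z : List (List Int)) (i : Int) (h0 : 0 ≤ i) (h1 : i < (Z.length : Int)) :
    PySem.List.pyGetD Z i [] ∈ Z := by
  rw [PySem.List.pyGetD_eq_getElem _ [] h0 h1]
  exact List.getElem_mem _

lemma cell_eq (Z : List (List Int)) (x y : Int)
    (hlen : ∀ r ∈ Z, (PySem.List.pyGetD Z 0 []).length ≤ r.length)
    (hx1 : 1 ≤ x) (hx2 : x < (Z.length : Int) - 1)
    (hy1 : 1 ≤ y) (hy2 : y < ((PySem.List.pyGetD Z 0 []).length : Int) - 1) :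
    pvGet2 Z (x-1) (y-1) + pvGet2 Z x (y-1) + pvGet2 Z (x+1) (y-1)
      + pvGet2 Z (x-1) y + 0 + pvGet2 Z (x+1) y
      + pvGet2 Z (x-1) (y+1) + pvGet2 Z x (y+1) + pvGet2 Z (x+1) (y+1)
    = pvBand (Z.map pvPrefix) (x-1) y + pvBand (Z.map pvPrefix) x y
        + pvBand (Z.map pvPrefix) (x+1) y - pvGet2 Z x y := by
  have hband : ∀ i : Int, 0 ≤ i → i < (Z.length : Int) →
      pvBand (Z.map pvPrefix) i y
        = pvGet2 Z i (y-1) + pvGet2 Z i y + pvGet2 Z i (y+1) := by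
    intro i h0 h1
    have hr := hlen _ (row_mem Z i h0 h1)
    unfold pvBand pvGet2
    rw [pyGetD_map_pvPrefix Z i h0 h1]
    exact pvBand_prefix _ y (y-1).toNat (by omega) (by omega)
  rw [hband (x-1) (by omega) (by omega), hband x (by omega) (by omega),
      hband (x+1) (by omega) (by omega)]
  ring

-- ===== VERDICT (by name: the statement is the Claim_ definition above) =====
theorem calcul_nb_voisins_spec : Claim_equal_calcul_nb_voisins := by
  intro Z _ hpre
  unfold Spec_calcul_nb_voisins calcul_nb_voisins calcul_nb_voisins_alt
  apply PySem.List.foldl_congr_mem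
  intro N x hx
  apply PySem.List.foldl_congr_mem
  intro N' y hy
  rw [PySem.List.mem_pyRange_one] at hx hy
  congr 2
  have hlen : ∀ r ∈ Z, (PySem.List.pyGetD Z 0 []).length ≤ r.length := by
    rcases hpre with ⟨hne, h⟩
    rcases h with h | h | h
    · exact absurd (by omega : ¬ (1:Int) < (Z.length:Int) - 1) (by omega)
    · exact absurd (by omega : ¬ (1:Int) < ((PySem.List.pyGetD Z 0 []).length:Int) - 1) (by omega)
    · exact h.2.2
  exact cell_eq Z x y hlen hx.1 hx.2 hy.1 hy.2
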